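-- pv_equiv track=rewrite | github.com/comstering/CodingTest | 이것이 코딩테스트다(나동빈)/이론 및 실전문제/탐욕법(Greedy)/to1.py | solution
-- ===== SOURCE A (Python) =====
-- def solution(n, k):
--     count = 0
--     while True:
--         if n % k == 0:
--             n //= k
--         else:
--             n -= 1
--         count += 1
--
--         if n == 1:
--             break
--     return count
-- ===== SOURCE B (Python) =====
-- def solution(n, k):
--     # Steps to reach 1 = sum of base-k digits of n + number of digits - 2:
--     # each division consumes the lowest digit (that many subtractions plus one
--     # division), and the leading digit costs (digit - 1) final subtractions.
--     digits = []
--     while n: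
--         digits.append(n % k)
--         n //= k
--     return sum(digits) + len(digits) - 2
-- ===== Notes on version B (the rewrite author's own statement) =====
-- stated objective: faster
-- what changed: Instead of decrementing n one step at a time, B extracts the base-k digits of n in a first pass and returns sum(digits) + len(digits) - 2 as a closed arithmetic formula.
-- outside the precondition, e.g. on solution(1, 1): A returns 1, B does not finish within the time limit; on solution(5, -2): A returns 3, B returns -2
import Mathlib
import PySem

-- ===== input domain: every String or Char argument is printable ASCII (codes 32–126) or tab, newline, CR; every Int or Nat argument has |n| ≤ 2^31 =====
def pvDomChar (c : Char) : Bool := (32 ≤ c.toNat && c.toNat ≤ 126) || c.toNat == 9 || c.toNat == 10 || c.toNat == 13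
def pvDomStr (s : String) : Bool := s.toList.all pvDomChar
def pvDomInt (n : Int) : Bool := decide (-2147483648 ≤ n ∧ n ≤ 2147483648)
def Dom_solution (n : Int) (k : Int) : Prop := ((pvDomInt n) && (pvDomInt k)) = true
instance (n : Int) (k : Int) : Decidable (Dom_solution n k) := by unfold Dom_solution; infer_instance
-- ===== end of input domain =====

-- B replaces A's one-step-at-a-time loop by extracting the base-k digits of n and returning
-- sum(digits) + len(digits) - 2; equivalence of return values proved on n ≥ 2, k ≥ 2.

-- ===== PORT A =====
-- A's 'while True' loop: one iteration = divide if divisible else subtract 1, count += 1, break at n == 1.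
-- Fuel n.toNat + 1 bounds the iteration count (n strictly decreases and stays ≥ 1 on Pre_).
def solutionLoop (fuel : Nat) (n : Int) (k : Int) (count : Int) : Int :=
  match fuel with
  | 0 => count
  | fuel + 1 =>
    let n' := if PySem.Int.mod n k = 0 then PySem.Int.floordiv n k else n - 1
    if n' = 1 then count + 1 else solutionLoop fuel n' k (count + 1)

def solution (n : Int) (k : Int) : Int := solutionLoop (n.toNat + 1) n k 0

-- ===== PORT B =====
-- B's digit-extraction pass: 'while n: digits.append(n % k); n //= k'.
-- On Pre_ at most n iterations happen, so fuel n.toNat + 1 suffices.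
def digitsLoop (fuel : Nat) (n : Int) (k : Int) (acc : List Int) : List Int :=
  match fuel with
  | 0 => acc
  | fuel + 1 =>
    if n ≠ 0 then
      digitsLoop fuel (PySem.Int.floordiv n k) k (acc ++ [PySem.Int.mod n k])
    else acc

def solution_alt (n : Int) (k : Int) : Int :=
  let digits := digitsLoop (n.toNat + 1) n k []
  digits.sum + (digits.length : Int) - 2

-- ===== PRECONDITION & SPEC =====
-- Pre_ excludes n < 2 or k < 2: there A's while-loop fails to terminate for almost every input and
-- returns only on accidental corners (n = 1 with k = 1, and some negative divisors via Python's
-- sign-of-divisor modulo) that are artefacts of the loop shape, not values of the counting problem.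
def Pre_solution (n : Int) (k : Int) : Prop := 2 ≤ n ∧ 2 ≤ k
instance (n : Int) (k : Int) : Decidable (Pre_solution n k) := by unfold Pre_solution; infer_instance

def pvWitness_solution : Int × Int := (25, 3)

def Spec_solution (n : Int) (k : Int) (out : Int) : Prop := out = solution_alt n k
instance (n : Int) (k : Int) (out : Int) : Decidable (Spec_solution n k out) := by unfold Spec_solution; infer_instance

-- ===== CLAIM (what is proved, stated in full; the proofs are below) =====
def Claim_equal_solution : Prop := ∀ (n : Int) (k : Int), Dom_solution n k → Pre_solution n k → Spec_solution n k (solution n k)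

-- ===== LEMMAS AND PROOFS =====

-- Proof-side specification: the number of steps, by a batched recursion.
def gsteps (k : Int) (n : Int) : Int :=
  if _h : 2 ≤ k ∧ k ≤ n then
    n % k + (1 + gsteps k (n / k))
  else n - 1
termination_by n.toNat
decreasing_by
  have h1 : n / k < n := Int.ediv_lt_of_lt_mul (by omega) (by nlinarith)
  have _h2 : 0 ≤ n / k := Int.ediv_nonneg (by omega) (by omega)
  omega

theorem gsteps_small (k n : Int) (h : ¬(2 ≤ k ∧ k ≤ n)) : gsteps k n = n - 1 := by
  rw [gsteps]; simp [h]

theorem gsteps_big (k n : Int) (hk : 2 ≤ k) (hn : k ≤ n) :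
    gsteps k n = n % k + (1 + gsteps k (n / k)) := by
  rw [gsteps]; simp [hk, hn]

-- If k ∣ n on 2 ≤ n, 2 ≤ k then k ≤ n.
theorem dvd_le (k n : Int) (hk : 2 ≤ k) (hn : 2 ≤ n) (hm : n % k = 0) : k ≤ n := by
  by_contra h
  rw [Int.emod_eq_of_lt (by omega) (by omega)] at hm
  omega

-- Subtracting 1 from a non-multiple costs exactly one step of gsteps.
theorem gsteps_pred (k n : Int) (hk : 2 ≤ k) (hn : 2 ≤ n) (hm : n % k ≠ 0) :
    gsteps k n = 1 + gsteps k (n - 1) := by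
  by_cases hkn : k ≤ n
  · have hr0 : 0 ≤ n % k := Int.emod_nonneg n (by omega)
    have hrk : n % k < k := Int.emod_lt_of_pos n (by omega)
    have hdiv := Int.emod_add_mul_ediv n k
    have huniq : (n - 1) / k = n / k ∧ (n - 1) % k = n % k - 1 :=
      (Int.ediv_emod_unique (by omega)).2 (by constructor <;> omega)
    have hk1n : k ≤ n - 1 := by
      rcases lt_or_eq_of_le hkn with h | h
      · omega
      · exact absurd (by rw [← h, Int.emod_self]) hm
    rw [gsteps_big k n hk hkn, gsteps_big k (n - 1) hk hk1n, huniq.1, huniq.2]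
    ring
  · rw [gsteps_small k n (by omega), gsteps_small k (n - 1) (by omega)]
    ring

-- A's loop computes count + gsteps k n.
theorem solutionLoop_eq (k : Int) (hk : 2 ≤ k) :
    ∀ (fuel : Nat) (n count : Int), 2 ≤ n → n.toNat ≤ fuel →
      solutionLoop fuel n k count = count + gsteps k n := by
  intro fuel
  induction fuel with
  | zero => intro n count hn hf; omega
  | succ f ih =>
    intro n count hn hf
    have hk0 : (0 : Int) < k := by omega
    simp only [solutionLoop, PySem.Int.mod_eq_emod_of_pos hk0,
      PySem.Int.floordiv_eq_ediv_of_pos hk0]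
    by_cases hm : n % k = 0
    · have hkn : k ≤ n := dvd_le k n hk hn hm
      have hq1 : 1 ≤ n / k := (Int.le_ediv_iff_mul_le hk0).2 (by omega)
      have hqlt : n / k < n := Int.ediv_lt_of_lt_mul hk0 (by nlinarith)
      rw [if_pos hm, gsteps_big k n hk hkn, hm]
      by_cases hq : n / k = 1
      · rw [if_pos hq, hq, gsteps_small k 1 (by omega)]
        ring
      · rw [if_neg hq, ih (n / k) (count + 1) (by omega) (by omega)]
        ring
    · rw [if_neg hm]
      by_cases h2 : n = 2
      · subst h2
        rw [if_pos (by norm_num), gsteps_pred k 2 hk (by omega) hm]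
        norm_num [gsteps_small k 1 (by omega)]
      · rw [if_neg (by omega), ih (n - 1) (count + 1) (by omega) (by omega),
          gsteps_pred k n hk hn hm]
        ring

-- B's digit loop: sum + length of the produced list equals that of acc plus gsteps k n + 2.
theorem digitsLoop_eq (k : Int) (hk : 2 ≤ k) :
    ∀ (fuel : Nat) (n : Int) (acc : List Int), 1 ≤ n → n.toNat ≤ fuel →
      (digitsLoop fuel n k acc).sum + ((digitsLoop fuel n k acc).length : Int)
        = acc.sum + (acc.length : Int) + gsteps k n + 2 := by
  intro fuel
  induction fuel with
  | zero => intro n acc hn hf; omega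
  | succ f ih =>
    intro n acc hn hf
    have hk0 : (0 : Int) < k := by omega
    simp only [digitsLoop, PySem.Int.mod_eq_emod_of_pos hk0,
      PySem.Int.floordiv_eq_ediv_of_pos hk0]
    rw [if_pos (by omega : n ≠ 0)]
    by_cases hkn : k ≤ n
    · have hq1 : 1 ≤ n / k := (Int.le_ediv_iff_mul_le hk0).2 (by omega)
      have hqlt : n / k < n := Int.ediv_lt_of_lt_mul hk0 (by nlinarith)
      rw [ih (n / k) (acc ++ [n % k]) (by omega) (by omega),
        gsteps_big k n hk hkn]
      simp [List.sum_append]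
      ring
    · -- 1 ≤ n < k: quotient is 0, the recursive call returns its accumulator.
      have hq0 : n / k = 0 := Int.ediv_eq_zero_of_lt (by omega) (by omega)
      have hstop : digitsLoop f 0 k (acc ++ [n % k]) = acc ++ [n % k] := by
        cases f <;> simp [digitsLoop]
      rw [hq0, hstop, gsteps_small k n (by omega),
        Int.emod_eq_of_lt (by omega) (by omega)]
      simp [List.sum_append]
      ring

-- ===== VERDICT (by name: the statement is the Claim_ definition above) =====
theorem solution_spec : Claim_equal_solution := by
  intro n k _ hpre
  obtain ⟨hn, hk⟩ := hpre
  show solution n k = solution_alt n k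
  unfold solution solution_alt
  rw [solutionLoop_eq k hk (n.toNat + 1) n 0 hn (by omega)]
  have h := digitsLoop_eq k hk (n.toNat + 1) n [] (by omega) (by omega)
  simp only [List.sum_nil, List.length_nil] at h
  show 0 + gsteps k n
      = (digitsLoop (n.toNat + 1) n k []).sum + ((digitsLoop (n.toNat + 1) n k []).length : Int) - 2
  omega
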